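-- pv_equiv track=rewrite | github.com/mike-jolliffe/Learning | PDX_Code_Guild/hammer.py | hammer
-- ===== SOURCE A (Python) =====
-- def hammer(time):
--   '''Given a time string, returns string of what time it is'''
--   what_time = {"Breakfast": ["7AM", "8AM", "9AM"], "Lunch": ["12PM", "1PM", "2PM"],
--                "Dinner": ["7PM", "8PM", "9PM"], "Hammer": ["10PM", "11PM", "12AM",
--                 "1AM", "2AM", "3AM", "4AM"]}
--
--   time = [key for (key, value) in what_time.items() if time in what_time[key]]
--   if len(time) == 0:
--       return "Who knows what time that is!!"
--
--   return f"It's {str(time[0])} time"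
-- ===== SOURCE B (Python) =====
-- TIME_TO_MEAL = {"7AM": "Breakfast", "8AM": "Breakfast", "9AM": "Breakfast",
--                 "12PM": "Lunch", "1PM": "Lunch", "2PM": "Lunch",
--                 "7PM": "Dinner", "8PM": "Dinner", "9PM": "Dinner",
--                 "10PM": "Hammer", "11PM": "Hammer", "12AM": "Hammer",
--                 "1AM": "Hammer", "2AM": "Hammer", "3AM": "Hammer", "4AM": "Hammer"}
--
-- def hammer(time):
--     meal = TIME_TO_MEAL.get(time)
--     if meal is None:
--         return "Who knows what time that is!!"
--     return f"It's {meal} time"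
-- ===== Notes on version B (the rewrite author's own statement) =====
-- stated objective: simpler
-- what changed: Replaces the meal->times dict plus a comprehension scanning all keys (with an inner membership scan per key) by one precomputed flat time->meal mapping and a single keyed lookup; the scanning loop disappears.
import Mathlib
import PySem

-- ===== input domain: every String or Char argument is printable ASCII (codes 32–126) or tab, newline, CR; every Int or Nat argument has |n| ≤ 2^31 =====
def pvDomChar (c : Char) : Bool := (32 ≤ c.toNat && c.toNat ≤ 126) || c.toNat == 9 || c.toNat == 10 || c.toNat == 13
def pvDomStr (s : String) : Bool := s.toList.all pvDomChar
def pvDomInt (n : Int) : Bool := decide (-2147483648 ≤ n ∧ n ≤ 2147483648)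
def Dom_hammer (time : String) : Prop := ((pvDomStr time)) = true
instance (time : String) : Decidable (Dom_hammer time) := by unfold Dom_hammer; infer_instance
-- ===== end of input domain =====

-- B replaces A's meal->times dict and key-scanning comprehension with one flat time->meal reverse map and a single keyed lookup (objective: simpler).


-- ===== PORT A =====
-- A's meal -> times dict, in insertion order
def whatTime : PySem.Dict String (List String) :=
  PySem.Dict.mk [("Breakfast", ["7AM", "8AM", "9AM"]), ("Lunch", ["12PM", "1PM", "2PM"]),
   ("Dinner", ["7PM", "8PM", "9PM"]),
   ("Hammer", ["10PM", "11PM", "12AM", "1AM", "2AM", "3AM", "4AM"])]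

def hammer (time : String) : String :=
  -- [key for (key, value) in what_time.items() if time in what_time[key]]
  let keys := (PySem.Dict.items whatTime).foldl
    (fun acc kv => if (PySem.Dict.getD whatTime kv.1 []).contains time then acc ++ [kv.1] else acc) []
  if keys.length = 0 then "Who knows what time that is!!"
  else "It's " ++ (keys.headD "") ++ " time"   -- time[0]; list nonempty here, so headD is exact

-- ===== PORT B =====
def timeToMeal : PySem.Dict String String :=
  PySem.Dict.mk [("7AM", "Breakfast"), ("8AM", "Breakfast"), ("9AM", "Breakfast"),
   ("12PM", "Lunch"), ("1PM", "Lunch"), ("2PM", "Lunch"),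
   ("7PM", "Dinner"), ("8PM", "Dinner"), ("9PM", "Dinner"),
   ("10PM", "Hammer"), ("11PM", "Hammer"), ("12AM", "Hammer"),
   ("1AM", "Hammer"), ("2AM", "Hammer"), ("3AM", "Hammer"), ("4AM", "Hammer")]

def hammer_alt (time : String) : String :=
  match PySem.Dict.get? timeToMeal time with
  | none => "Who knows what time that is!!"
  | some meal => "It's " ++ meal ++ " time"

-- ===== PRECONDITION & SPEC =====
def Spec_hammer (time : String) (out : String) : Prop := out = hammer_alt time
instance (time : String) (out : String) : Decidable (Spec_hammer time out) := by unfold Spec_hammer; infer_instance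

-- ===== CLAIM (what is proved, stated in full; the proofs are below) =====
def Claim_equal_hammer : Prop := ∀ (time : String), Dom_hammer time → Spec_hammer time (hammer time)

-- ===== LEMMAS AND PROOFS =====

-- ===== VERDICT (by name: the statement is the Claim_ definition above) =====
set_option maxRecDepth 2000 in
theorem hammer_spec : Claim_equal_hammer := by
  intro t _
  unfold Spec_hammer hammer hammer_alt
  by_cases h1 : t = "7AM"; · subst h1; decide
  by_cases h2 : t = "8AM"; · subst h2; decide
  by_cases h3 : t = "9AM"; · subst h3; decide
  by_cases h4 : t = "12PM"; · subst h4; decide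
  by_cases h5 : t = "1PM"; · subst h5; decide
  by_cases h6 : t = "2PM"; · subst h6; decide
  by_cases h7 : t = "7PM"; · subst h7; decide
  by_cases h8 : t = "8PM"; · subst h8; decide
  by_cases h9 : t = "9PM"; · subst h9; decide
  by_cases h10 : t = "10PM"; · subst h10; decide
  by_cases h11 : t = "11PM"; · subst h11; decide
  by_cases h12 : t = "12AM"; · subst h12; decide
  by_cases h13 : t = "1AM"; · subst h13; decide
  by_cases h14 : t = "2AM"; · subst h14; decide
  by_cases h15 : t = "3AM"; · subst h15; decide
  by_cases h16 : t = "4AM"; · subst h16; decide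
  have b1 : (t == "7AM") = false := by simp [h1]
  have c1 : ("7AM" == t) = false := by simp only [beq_eq_false_iff_ne]; exact fun e => h1 e.symm
  have b2 : (t == "8AM") = false := by simp [h2]
  have c2 : ("8AM" == t) = false := by simp only [beq_eq_false_iff_ne]; exact fun e => h2 e.symm
  have b3 : (t == "9AM") = false := by simp [h3]
  have c3 : ("9AM" == t) = false := by simp only [beq_eq_false_iff_ne]; exact fun e => h3 e.symm
  have b4 : (t == "12PM") = false := by simp [h4]
  have c4 : ("12PM" == t) = false := by simp only [beq_eq_false_iff_ne]; exact fun e => h4 e.symm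
  have b5 : (t == "1PM") = false := by simp [h5]
  have c5 : ("1PM" == t) = false := by simp only [beq_eq_false_iff_ne]; exact fun e => h5 e.symm
  have b6 : (t == "2PM") = false := by simp [h6]
  have c6 : ("2PM" == t) = false := by simp only [beq_eq_false_iff_ne]; exact fun e => h6 e.symm
  have b7 : (t == "7PM") = false := by simp [h7]
  have c7 : ("7PM" == t) = false := by simp only [beq_eq_false_iff_ne]; exact fun e => h7 e.symm
  have b8 : (t == "8PM") = false := by simp [h8]
  have c8 : ("8PM" == t) = false := by simp only [beq_eq_false_iff_ne]; exact fun e => h8 e.symm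
  have b9 : (t == "9PM") = false := by simp [h9]
  have c9 : ("9PM" == t) = false := by simp only [beq_eq_false_iff_ne]; exact fun e => h9 e.symm
  have b10 : (t == "10PM") = false := by simp [h10]
  have c10 : ("10PM" == t) = false := by simp only [beq_eq_false_iff_ne]; exact fun e => h10 e.symm
  have b11 : (t == "11PM") = false := by simp [h11]
  have c11 : ("11PM" == t) = false := by simp only [beq_eq_false_iff_ne]; exact fun e => h11 e.symm
  have b12 : (t == "12AM") = false := by simp [h12]
  have c12 : ("12AM" == t) = false := by simp only [beq_eq_false_iff_ne]; exact fun e => h12 e.symm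
  have b13 : (t == "1AM") = false := by simp [h13]
  have c13 : ("1AM" == t) = false := by simp only [beq_eq_false_iff_ne]; exact fun e => h13 e.symm
  have b14 : (t == "2AM") = false := by simp [h14]
  have c14 : ("2AM" == t) = false := by simp only [beq_eq_false_iff_ne]; exact fun e => h14 e.symm
  have b15 : (t == "3AM") = false := by simp [h15]
  have c15 : ("3AM" == t) = false := by simp only [beq_eq_false_iff_ne]; exact fun e => h15 e.symm
  have b16 : (t == "4AM") = false := by simp [h16]
  have c16 : ("4AM" == t) = false := by simp only [beq_eq_false_iff_ne]; exact fun e => h16 e.symm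
  have q1 : (PySem.Dict.getD whatTime "Breakfast" []).contains t = false := by
    have e : PySem.Dict.getD whatTime "Breakfast" [] = ["7AM", "8AM", "9AM"] := by decide
    rw [e]; simp only [List.contains_cons, List.contains_nil, b1, b2, b3, Bool.or_false]
  have q2 : (PySem.Dict.getD whatTime "Lunch" []).contains t = false := by
    have e : PySem.Dict.getD whatTime "Lunch" [] = ["12PM", "1PM", "2PM"] := by decide
    rw [e]; simp only [List.contains_cons, List.contains_nil, b4, b5, b6, Bool.or_false]
  have q3 : (PySem.Dict.getD whatTime "Dinner" []).contains t = false := by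
    have e : PySem.Dict.getD whatTime "Dinner" [] = ["7PM", "8PM", "9PM"] := by decide
    rw [e]; simp only [List.contains_cons, List.contains_nil, b7, b8, b9, Bool.or_false]
  have q4 : (PySem.Dict.getD whatTime "Hammer" []).contains t = false := by
    have e : PySem.Dict.getD whatTime "Hammer" [] = ["10PM", "11PM", "12AM", "1AM", "2AM", "3AM", "4AM"] := by decide
    rw [e]; simp only [List.contains_cons, List.contains_nil, b10, b11, b12, b13, b14, b15, b16, Bool.or_false]
  have hi : PySem.Dict.items whatTime =
      [("Breakfast", ["7AM", "8AM", "9AM"]), ("Lunch", ["12PM", "1PM", "2PM"]),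
       ("Dinner", ["7PM", "8PM", "9PM"]),
       ("Hammer", ["10PM", "11PM", "12AM", "1AM", "2AM", "3AM", "4AM"])] := by decide
  have hr : PySem.Dict.get? timeToMeal t = none := by
    simp only [timeToMeal, PySem.Dict.get?_mk_cons, c1, c2, c3, c4, c5, c6, c7, c8, c9, c10,
      c11, c12, c13, c14, c15, c16]
    simp [PySem.Dict.get?]
  rw [hi] at *
  simp only [List.foldl, q1, q2, q3, q4, hr]
  simp
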